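-- pv_equiv track=rewrite | github.com/dannystocker/infrafabric | if.legal/scripts/consolidate_manifests.py | detect_vertical
-- ===== SOURCE A (Python) =====
-- def detect_vertical(document_name: str, local_path: str = "") -> str:
--     """Detect legal vertical from document name and path."""
--     combined = f"{document_name} {local_path}".lower()
--
--     # Map vertical detection
--     if any(w in combined for w in ["housing", "landlord", "tenant", "rental", "eviction"]):
--         return "housing"
--     elif any(w in combined for w in ["insurance", "cover", "claim", "policy"]):
--         return "insurance"
--     elif any(w in combined for w in ["construction", "building", "lien", "contractor", "payment bond"]):
--         return "construction"
--     elif any(w in combined for w in ["criminal", "crime", "fraud", "bribery", "money.launder", "offense"]):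
--         return "criminal"
--     elif any(w in combined for w in ["copyright", "patent", "trademark", "intellectual.property", "work.for.hire", "ownership"]):
--         return "ip"
--     elif any(w in combined for w in ["contract", "agreement", "terms", "condition"]):
--         return "contracts"
--     elif any(w in combined for w in ["employment", "labor", "work", "worker", "employee"]):
--         return "employment"
--     elif any(w in combined for w in ["tax", "accounting", "irpf", "iva"]):
--         return "tax"
--     elif any(w in combined for w in ["privacy", "data", "gdpr"]):
--         return "privacy"
--     elif any(w in combined for w in ["property", "real.estate", "mortgage", "cadastr"]):
--         return "property"
--     else:
--         return "general"
-- ===== SOURCE B (Python) =====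
-- # Different algorithm: instead of testing rule lists in priority order with an
-- # early return, flatten all keywords into (keyword, priority) pairs, make ONE
-- # pass accumulating the MINIMUM priority among all matching keywords, then map
-- # that priority back to its vertical name.
-- VERTICALS = ["housing", "insurance", "construction", "criminal", "ip",
--              "contracts", "employment", "tax", "privacy", "property"]
--
-- KEYWORD_LISTS = [
--     ["housing", "landlord", "tenant", "rental", "eviction"],
--     ["insurance", "cover", "claim", "policy"],
--     ["construction", "building", "lien", "contractor", "payment bond"],
--     ["criminal", "crime", "fraud", "bribery", "money.launder", "offense"],
--     ["copyright", "patent", "trademark", "intellectual.property", "work.for.hire", "ownership"],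
--     ["contract", "agreement", "terms", "condition"],
--     ["employment", "labor", "work", "worker", "employee"],
--     ["tax", "accounting", "irpf", "iva"],
--     ["privacy", "data", "gdpr"],
--     ["property", "real.estate", "mortgage", "cadastr"],
-- ]
--
-- KEYWORD_PRI = [(kw, i) for i, ws in enumerate(KEYWORD_LISTS) for kw in ws]
--
--
-- def detect_vertical(document_name: str, local_path: str = "") -> str:
--     """Detect legal vertical from document name and path."""
--     combined = f"{document_name} {local_path}".lower()
--     best = None
--     for kw, pri in KEYWORD_PRI:
--         if kw in combined:
--             best = pri if best is None else min(best, pri)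
--     return "general" if best is None else VERTICALS[best]
-- ===== Notes on version B (the rewrite author's own statement) =====
-- stated objective: alternative
-- what changed: Replaces the priority-ordered if/elif early-return chain by a single unconditional pass over a flat (keyword, priority) list that accumulates the minimum matching priority, then maps that priority back to its vertical name.
import Mathlib
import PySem

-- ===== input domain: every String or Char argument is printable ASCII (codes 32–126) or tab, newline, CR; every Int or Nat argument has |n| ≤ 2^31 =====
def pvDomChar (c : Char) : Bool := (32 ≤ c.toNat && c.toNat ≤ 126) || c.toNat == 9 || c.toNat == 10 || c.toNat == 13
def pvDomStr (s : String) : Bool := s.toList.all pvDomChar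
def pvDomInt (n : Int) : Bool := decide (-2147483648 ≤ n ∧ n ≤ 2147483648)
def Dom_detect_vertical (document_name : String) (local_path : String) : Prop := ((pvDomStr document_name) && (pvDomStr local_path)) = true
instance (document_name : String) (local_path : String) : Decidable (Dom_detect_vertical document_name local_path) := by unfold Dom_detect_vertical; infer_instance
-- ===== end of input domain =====

-- B replaces A's priority-ordered if/elif early-return chain by one full pass over a flat (keyword, priority) list accumulating the minimum matching priority (alternative decomposition, same cost).


-- ===== PORT A =====
-- f"{document_name} {local_path}".lower(), built on List Char (PySem.Chars) — exact on the ASCII domain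
def detect_vertical (document_name : String) (local_path : String) : String :=
  let combined := PySem.Chars.lower (document_name.toList ++ ' ' :: local_path.toList)
  if ["housing", "landlord", "tenant", "rental", "eviction"].any (fun w => PySem.Chars.isIn w.toList combined) then "housing"
  else if ["insurance", "cover", "claim", "policy"].any (fun w => PySem.Chars.isIn w.toList combined) then "insurance"
  else if ["construction", "building", "lien", "contractor", "payment bond"].any (fun w => PySem.Chars.isIn w.toList combined) then "construction"
  else if ["criminal", "crime", "fraud", "bribery", "money.launder", "offense"].any (fun w => PySem.Chars.isIn w.toList combined) then "criminal"
  else if ["copyright", "patent", "trademark", "intellectual.property", "work.for.hire", "ownership"].any (fun w => PySem.Chars.isIn w.toList combined) then "ip"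
  else if ["contract", "agreement", "terms", "condition"].any (fun w => PySem.Chars.isIn w.toList combined) then "contracts"
  else if ["employment", "labor", "work", "worker", "employee"].any (fun w => PySem.Chars.isIn w.toList combined) then "employment"
  else if ["tax", "accounting", "irpf", "iva"].any (fun w => PySem.Chars.isIn w.toList combined) then "tax"
  else if ["privacy", "data", "gdpr"].any (fun w => PySem.Chars.isIn w.toList combined) then "privacy"
  else if ["property", "real.estate", "mortgage", "cadastr"].any (fun w => PySem.Chars.isIn w.toList combined) then "property"
  else "general"

-- ===== PORT B =====
def pvVerticals : List String :=
  ["housing", "insurance", "construction", "criminal", "ip",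
   "contracts", "employment", "tax", "privacy", "property"]

def pvKeywordLists : List (List String) :=
  [["housing", "landlord", "tenant", "rental", "eviction"],
   ["insurance", "cover", "claim", "policy"],
   ["construction", "building", "lien", "contractor", "payment bond"],
   ["criminal", "crime", "fraud", "bribery", "money.launder", "offense"],
   ["copyright", "patent", "trademark", "intellectual.property", "work.for.hire", "ownership"],
   ["contract", "agreement", "terms", "condition"],
   ["employment", "labor", "work", "worker", "employee"],
   ["tax", "accounting", "irpf", "iva"],
   ["privacy", "data", "gdpr"],
   ["property", "real.estate", "mortgage", "cadastr"]]

-- KEYWORD_PRI = [(kw, i) for i, ws in enumerate(KEYWORD_LISTS) for kw in ws]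
def pvKeywordPri : List (String × Int) :=
  (PySem.List.enumerate pvKeywordLists).flatMap (fun p => p.2.map (fun w => (w, p.1)))

-- one pass accumulating the minimum matching priority, then index into VERTICALS
-- (the .getD "general" on the lookup only totalises VERTICALS[best]; best is always in range)
def detect_vertical_alt (document_name : String) (local_path : String) : String :=
  let combined := PySem.Chars.lower (document_name.toList ++ ' ' :: local_path.toList)
  let best := pvKeywordPri.foldl
    (fun acc p =>
      if PySem.Chars.isIn p.1.toList combined then
        some (match acc with | none => p.2 | some b => min b p.2)
      else acc) none
  match best with
  | none => "general"
  | some i => (PySem.List.pyGet? pvVerticals i).getD "general"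

-- ===== PRECONDITION & SPEC =====
def Spec_detect_vertical (document_name : String) (local_path : String) (out : String) : Prop := out = detect_vertical_alt document_name local_path
instance (document_name : String) (local_path : String) (out : String) : Decidable (Spec_detect_vertical document_name local_path out) := by unfold Spec_detect_vertical; infer_instance

-- ===== CLAIM (what is proved, stated in full; the proofs are below) =====
def Claim_equal_detect_vertical : Prop := ∀ (document_name : String) (local_path : String), Dom_detect_vertical document_name local_path → Spec_detect_vertical document_name local_path (detect_vertical document_name local_path)

-- ===== LEMMAS AND PROOFS =====

-- the flat (keyword, priority) list is the concatenation of the ten groups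
theorem pvKeywordPri_groups :
    pvKeywordPri =
      (["housing", "landlord", "tenant", "rental", "eviction"].map (fun w => (w, (0 : Int)))) ++
      (["insurance", "cover", "claim", "policy"].map (fun w => (w, (1 : Int)))) ++
      (["construction", "building", "lien", "contractor", "payment bond"].map (fun w => (w, (2 : Int)))) ++
      (["criminal", "crime", "fraud", "bribery", "money.launder", "offense"].map (fun w => (w, (3 : Int)))) ++
      (["copyright", "patent", "trademark", "intellectual.property", "work.for.hire", "ownership"].map (fun w => (w, (4 : Int)))) ++
      (["contract", "agreement", "terms", "condition"].map (fun w => (w, (5 : Int)))) ++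
      (["employment", "labor", "work", "worker", "employee"].map (fun w => (w, (6 : Int)))) ++
      (["tax", "accounting", "irpf", "iva"].map (fun w => (w, (7 : Int)))) ++
      (["privacy", "data", "gdpr"].map (fun w => (w, (8 : Int)))) ++
      (["property", "real.estate", "mortgage", "cadastr"].map (fun w => (w, (9 : Int)))) := by
  rfl

-- folding one priority group: result is 'if any keyword matches then min of i and acc else acc'
theorem pvGroupFold (c : List Char) (i : Int) (ws : List String) (acc : Option Int) :
    (ws.map (fun w => (w, i))).foldl
      (fun acc p =>
        if PySem.Chars.isIn p.1.toList c then
          some (match acc with | none => p.2 | some b => min b p.2)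
        else acc) acc =
    if ws.any (fun w => PySem.Chars.isIn w.toList c) then
      some (match acc with | none => i | some b => min b i)
    else acc := by
  induction ws generalizing acc with
  | nil => simp
  | cons w rest ih =>
    simp only [List.map, List.foldl, List.any_cons]
    by_cases h : PySem.Chars.isIn w.toList c = true
    · simp only [h, if_pos, Bool.true_or, ih]
      cases acc with
      | none => split <;> simp [min_self]
      | some b => split <;> simp
    · simp only [Bool.not_eq_true] at h
      simp [h, ih]

-- ===== VERDICT (by name: the statement is the Claim_ definition above) =====
set_option maxHeartbeats 2000000 in
theorem detect_vertical_spec : Claim_equal_detect_vertical := by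
  intro document_name local_path _
  unfold Spec_detect_vertical detect_vertical detect_vertical_alt
  rw [pvKeywordPri_groups]
  simp only [List.foldl_append, pvGroupFold]
  generalize (List.any ["housing", "landlord", "tenant", "rental", "eviction"] fun w => PySem.Chars.isIn w.toList _) = b0
  generalize (List.any ["insurance", "cover", "claim", "policy"] fun w => PySem.Chars.isIn w.toList _) = b1
  generalize (List.any ["construction", "building", "lien", "contractor", "payment bond"] fun w => PySem.Chars.isIn w.toList _) = b2
  generalize (List.any ["criminal", "crime", "fraud", "bribery", "money.launder", "offense"] fun w => PySem.Chars.isIn w.toList _) = b3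
  generalize (List.any ["copyright", "patent", "trademark", "intellectual.property", "work.for.hire", "ownership"] fun w => PySem.Chars.isIn w.toList _) = b4
  generalize (List.any ["contract", "agreement", "terms", "condition"] fun w => PySem.Chars.isIn w.toList _) = b5
  generalize (List.any ["employment", "labor", "work", "worker", "employee"] fun w => PySem.Chars.isIn w.toList _) = b6
  generalize (List.any ["tax", "accounting", "irpf", "iva"] fun w => PySem.Chars.isIn w.toList _) = b7
  generalize (List.any ["privacy", "data", "gdpr"] fun w => PySem.Chars.isIn w.toList _) = b8
  generalize (List.any ["property", "real.estate", "mortgage", "cadastr"] fun w => PySem.Chars.isIn w.toList _) = b9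
  revert b0 b1 b2 b3 b4 b5 b6 b7 b8 b9
  decide
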